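-- pv_equiv track=rewrite | github.com/Art2design/Quizbot1 | services/checklist_service.py | _generate_tags_analysis
-- ===== SOURCE A (Python) =====
-- from typing import Dict, List, Any
--
-- def _generate_tags_analysis(sorted_tags: List[tuple]) -> str:
--     """
--     Создает форматированный текст анализа тегов с ошибками
--     """
--     if not sorted_tags:
--         return "У вас не было ошибок! Отличный результат!"
--
--     # Группируем теги по количеству ошибок
--     tags_by_error_count = {}
--     for tag, count in sorted_tags:
--         if count not in tags_by_error_count:
--             tags_by_error_count[count] = []
--         tags_by_error_count[count].append(tag)
--
--     # Отсортированные по убыванию количества ошибок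
--     error_counts = sorted(tags_by_error_count.keys(), reverse=True)
--
--     analysis = ""
--
--     # Инициализируем переменную с безопасным значением
--     max_error_count = 0
--
--     # Самые сложные темы (наибольшее количество ошибок)
--     if error_counts:
--         max_error_count = error_counts[0]
--         hardest_tags = tags_by_error_count[max_error_count]
--         hardest_tags_str = ", ".join(hardest_tags)
--
--         if len(hardest_tags) == 1:
--             analysis += f"<b>Самая сложная для вас тема:</b> \"{hardest_tags_str}\"\n\n"
--         else:
--             analysis += f"<b>Самые сложные для вас темы:</b> \"{hardest_tags_str}\"\n\n"
--
--     # Средние по сложности темы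
--     middle_counts = [count for count in error_counts if count != max_error_count and count > 1]
--     if middle_counts:
--         middle_tags = []
--         for count in middle_counts:
--             middle_tags.extend(tags_by_error_count[count])
--
--         middle_tags_str = ", ".join(middle_tags)
--         analysis += f"<b>Вы также сделали ошибки в темах:</b> \"{middle_tags_str}\"\n\n"
--
--     # Темы с одной ошибкой
--     if 1 in tags_by_error_count:
--         one_error_tags = tags_by_error_count[1]
--         one_error_tags_str = ", ".join(one_error_tags)
--
--         analysis += f"<b>И немного ошиблись в темах:</b> \"{one_error_tags_str}\"\n\n"
--
--     return analysis
-- ===== SOURCE B (Python) =====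
-- def _generate_tags_analysis(sorted_tags):
--     """
--     Создает форматированный текст анализа тегов с ошибками
--     (dict-free: stable sort by error count descending, then partition)
--     """
--     if not sorted_tags:
--         return "У вас не было ошибок! Отличный результат!"
--
--     b = sorted(sorted_tags, key=lambda tc: -tc[1])
--     max_count = b[0][1]
--
--     hardest = [tag for tag, c in b if c == max_count]
--     middle = [tag for tag, c in b if c != max_count and c > 1]
--     one_error = [tag for tag, c in b if c == 1]
--
--     analysis = ""
--     if len(hardest) == 1:
--         analysis += f"<b>Самая сложная для вас тема:</b> \"{', '.join(hardest)}\"\n\n"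
--     else:
--         analysis += f"<b>Самые сложные для вас темы:</b> \"{', '.join(hardest)}\"\n\n"
--     if middle:
--         analysis += f"<b>Вы также сделали ошибки в темах:</b> \"{', '.join(middle)}\"\n\n"
--     if one_error:
--         analysis += f"<b>И немного ошиблись в темах:</b> \"{', '.join(one_error)}\"\n\n"
--     return analysis
-- ===== Notes on version B (the rewrite author's own statement) =====
-- stated objective: simpler
-- what changed: B drops A's count-keyed grouping dict and per-group concatenation: it stable-sorts the pairs once by descending error count and partitions that sorted list with three filters (count == max, 1 < count != max, count == 1).
import Mathlib
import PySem

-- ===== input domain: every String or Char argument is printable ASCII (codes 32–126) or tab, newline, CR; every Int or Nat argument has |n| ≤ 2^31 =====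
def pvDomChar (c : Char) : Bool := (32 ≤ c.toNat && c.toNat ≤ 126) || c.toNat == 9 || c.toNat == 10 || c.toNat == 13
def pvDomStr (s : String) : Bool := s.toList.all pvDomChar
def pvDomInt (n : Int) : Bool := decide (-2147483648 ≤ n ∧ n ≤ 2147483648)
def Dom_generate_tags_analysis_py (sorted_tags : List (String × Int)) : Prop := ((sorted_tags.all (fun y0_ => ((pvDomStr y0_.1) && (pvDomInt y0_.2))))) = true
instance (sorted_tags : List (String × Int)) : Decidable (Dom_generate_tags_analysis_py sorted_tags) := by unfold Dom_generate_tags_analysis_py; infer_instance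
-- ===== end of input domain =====

-- B replaces A's count-keyed grouping dict with one stable sort by descending count
-- plus three filters over the sorted list (objective: simpler; same value proved equal).


-- ===== PORT A =====
-- literal transliteration of _generate_tags_analysis: group the (tag, count) pairs in a
-- dict keyed by count (the 'if count not in d: d[count] = []; d[count].append(tag)' pair
-- of lines is the append-with-default loop, ported as Dict.modify), sort the keys
-- descending, then emit the three sections.  Strings are assembled as List Char
-- (PySem.Chars) and packed with String.ofList at the end.
def generate_tags_analysis_py (sorted_tags : List (String × Int)) : String :=
  if sorted_tags = [] then "У вас не было ошибок! Отличный результат!"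
  else
    let d : PySem.Dict Int (List String) :=
      sorted_tags.foldl (fun d p => d.modify p.2 [] (fun l => l ++ [p.1])) PySem.Dict.empty
    let error_counts := PySem.List.sorted d.keys (fun c => c) true
    -- 'if error_counts:' — the match's [] arm is Python's skipped branch (analysis = "", max = 0)
    let st : List Char × Int :=
      match error_counts with
      | [] => ([], 0)
      | m :: _ =>
        let hardest_tags := d.getD m []
        let hardest_str := PySem.Chars.join ", ".toList (hardest_tags.map String.toList)
        (((if hardest_tags.length = 1 then
              "<b>Самая сложная для вас тема:</b> \"".toList
            else
              "<b>Самые сложные для вас темы:</b> \"".toList)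
           ++ hardest_str ++ "\"\n\n".toList), m)
    let analysis := st.1
    let max_error_count := st.2
    let middle_counts := error_counts.filter (fun c => decide (c ≠ max_error_count ∧ 1 < c))
    let analysis :=
      if middle_counts ≠ [] then
        let middle_tags := middle_counts.foldl (fun acc c => acc ++ d.getD c []) []
        analysis ++ "<b>Вы также сделали ошибки в темах:</b> \"".toList
          ++ PySem.Chars.join ", ".toList (middle_tags.map String.toList) ++ "\"\n\n".toList
      else analysis
    let analysis :=
      if d.contains 1 then
        analysis ++ "<b>И немного ошиблись в темах:</b> \"".toList
          ++ PySem.Chars.join ", ".toList ((d.getD 1 []).map String.toList) ++ "\"\n\n".toList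
      else analysis
    String.ofList analysis

-- ===== PORT B =====
-- literal transliteration of Source B: stable sort by key -count (PySem.List.sorted), read
-- max_count = b[0][1], then three comprehension filters over the sorted list.
def generate_tags_analysis_py_alt (sorted_tags : List (String × Int)) : String :=
  if sorted_tags = [] then "У вас не было ошибок! Отличный результат!"
  else
    let b := PySem.List.sorted sorted_tags (fun tc => -tc.2) false
    let max_count := (PySem.List.pyGetD b 0 ("", 0)).2
    let hardest := (b.filter (fun tc => decide (tc.2 = max_count))).map (fun tc => tc.1)
    let middle := (b.filter (fun tc => decide (tc.2 ≠ max_count ∧ 1 < tc.2))).map (fun tc => tc.1)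
    let one_error := (b.filter (fun tc => decide (tc.2 = (1 : Int)))).map (fun tc => tc.1)
    let analysis :=
      (if hardest.length = 1 then
          "<b>Самая сложная для вас тема:</b> \"".toList
        else
          "<b>Самые сложные для вас темы:</b> \"".toList)
      ++ PySem.Chars.join ", ".toList (hardest.map String.toList) ++ "\"\n\n".toList
    let analysis :=
      if middle ≠ [] then
        analysis ++ "<b>Вы также сделали ошибки в темах:</b> \"".toList
          ++ PySem.Chars.join ", ".toList (middle.map String.toList) ++ "\"\n\n".toList
      else analysis
    let analysis :=
      if one_error ≠ [] then
        analysis ++ "<b>И немного ошиблись в темах:</b> \"".toList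
          ++ PySem.Chars.join ", ".toList (one_error.map String.toList) ++ "\"\n\n".toList
      else analysis
    String.ofList analysis

-- ===== PRECONDITION & SPEC =====
def Spec_generate_tags_analysis_py (sorted_tags : List (String × Int)) (out : String) : Prop := out = generate_tags_analysis_py_alt sorted_tags
instance (sorted_tags : List (String × Int)) (out : String) : Decidable (Spec_generate_tags_analysis_py sorted_tags out) := by unfold Spec_generate_tags_analysis_py; infer_instance

-- ===== CLAIM (what is proved, stated in full; the proofs are below) =====
def Claim_equal_generate_tags_analysis_py : Prop := ∀ (sorted_tags : List (String × Int)), Dom_generate_tags_analysis_py sorted_tags → Spec_generate_tags_analysis_py sorted_tags (generate_tags_analysis_py sorted_tags)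

-- ===== LEMMAS AND PROOFS =====

-- insertBy puts x in front when it goes before every element (in fact: before the head).
lemma pv_insertBy_all_before {α : Type} (before : α → α → Bool) (x : α) (l : List α)
    (h : ∀ y ∈ l, before x y = true) :
    PySem.List.insertBy before x l = x :: l := by
  cases l with
  | nil => simp [PySem.List.insertBy]
  | cons y ys => simp [PySem.List.insertBy, h y (by simp)]

-- insertBy skips a prefix none of whose elements x goes before.
lemma pv_insertBy_append_left {α : Type} (before : α → α → Bool) (x : α) (l1 l2 : List α)
    (h : ∀ y ∈ l1, before x y = false) :
    PySem.List.insertBy before x (l1 ++ l2) = l1 ++ PySem.List.insertBy before x l2 := by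
  induction l1 with
  | nil => simp
  | cons y ys ih =>
    simp only [List.cons_append, PySem.List.insertBy, h y (by simp)]
    simp only [Bool.false_eq_true, if_false]
    exact congrArg (y :: ·) (ih (fun z hz => h z (by simp [hz])))

-- inserting x (key = -count) into a concatenation of count-classes listed in strictly
-- decreasing count order appends x at the end of its own class.
lemma pv_insertBy_flatMap (x : String × Int) (ks : List Int) (G : Int → List (String × Int))
    (hpw : ks.Pairwise (fun a b => b < a)) (hx : x.2 ∈ ks)
    (hG : ∀ c, ∀ p ∈ G c, p.2 = c) :
    PySem.List.insertBy (fun a b => decide (-a.2 < -b.2)) x (ks.flatMap G)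
      = ks.flatMap (fun c => G c ++ if x.2 = c then [x] else []) := by
  induction ks with
  | nil => cases hx
  | cons k ks ih =>
    have hpw' := (List.pairwise_cons.mp hpw).2
    have hk_gt : ∀ c ∈ ks, c < k := (List.pairwise_cons.mp hpw).1
    simp only [List.flatMap_cons]
    by_cases hxk : x.2 = k
    · rw [pv_insertBy_append_left _ _ _ _
        (fun y hy => by simp [hG k y hy, hxk])]
      rw [pv_insertBy_all_before _ _ _ (fun y hy => ?_)]
      · rw [if_pos hxk]
        have : ks.flatMap (fun c => G c ++ if x.2 = c then [x] else []) = ks.flatMap G := by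
          apply List.flatMap_congr
          intro c hc
          have : x.2 ≠ c := by
            have := hk_gt c hc; omega
          simp [this]
        rw [this]
        simp
      · rcases List.mem_flatMap.mp hy with ⟨c, hc, hyc⟩
        have h1 : y.2 = c := hG c y hyc
        have h2 : c < k := hk_gt c hc
        simp [h1, hxk]
        omega
    · have hxks : x.2 ∈ ks := by
        rcases List.mem_cons.mp hx with h | h
        · exact absurd h hxk
        · exact h
      have hxk_lt : x.2 < k := hk_gt _ hxks
      rw [pv_insertBy_append_left _ _ _ _
        (fun y hy => by
          have := hG k y hy
          simp [this]
          omega)]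
      rw [ih hpw' hxks, if_neg hxk]
      simp

-- stable sort by -count = concatenation of the count-classes, classes in strictly
-- decreasing count order, each class in original order.
lemma pv_foldl_insertBy_decomp (ks : List Int) (hpw : ks.Pairwise (fun a b => b < a))
    (xs : List (String × Int)) :
    (∀ p ∈ xs, p.2 ∈ ks) →
    List.foldl (fun acc x => PySem.List.insertBy (fun a b => decide (-a.2 < -b.2)) x acc) [] xs
      = ks.flatMap (fun c => xs.filter (fun p => p.2 == c)) := by
  induction xs using List.reverseRecOn with
  | nil => intro _; simp
  | append_singleton ys x ih =>
    intro hall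
    rw [List.foldl_append, List.foldl_cons, List.foldl_nil]
    rw [ih (fun p hp => hall p (by simp [hp]))]
    rw [pv_insertBy_flatMap x ks _ hpw (hall x (by simp))
        (fun c p hp => by simpa using (List.mem_filter.mp hp).2)]
    apply List.flatMap_congr
    intro c hc
    by_cases h : x.2 = c <;> simp [List.filter_append, h]

lemma pv_sorted_decomp (xs : List (String × Int)) (ks : List Int)
    (hpw : ks.Pairwise (fun a b => b < a)) (hall : ∀ p ∈ xs, p.2 ∈ ks) :
    PySem.List.sorted xs (fun tc => -tc.2) false
      = ks.flatMap (fun c => xs.filter (fun p => p.2 == c)) := by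
  rw [PySem.List.sorted_eq_foldl_insertBy]
  exact pv_foldl_insertBy_decomp ks hpw xs hall

-- filtering a concatenation of count-classes by a predicate on the count filters the classes.
lemma pv_filter_flatMap_classes (ks : List Int) (G : Int → List (String × Int)) (q : Int → Bool)
    (hG : ∀ c, ∀ p ∈ G c, p.2 = c) :
    (ks.flatMap G).filter (fun p => q p.2) = (ks.filter q).flatMap G := by
  induction ks with
  | nil => simp
  | cons k ks ih =>
    simp only [List.flatMap_cons, List.filter_append, List.filter_cons]
    by_cases hq : q k = true
    · rw [List.filter_eq_self.mpr (fun p hp => by rw [hG k p hp]; exact hq)]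
      simp [hq, ih]
    · rw [List.filter_eq_nil_iff.mpr (fun p hp => by rw [hG k p hp]; simp [hq])]
      simp [hq, ih]

-- a nodup list filtered by equality with one of its members is that singleton.
lemma pv_filter_eq_singleton (l : List Int) (a : Int) (h : l.Nodup) (ha : a ∈ l) :
    l.filter (fun c => decide (c = a)) = [a] := by
  induction l with
  | nil => cases ha
  | cons b l ih =>
    by_cases hb : b = a
    · subst hb
      have hnotin : b ∉ l := (List.nodup_cons.mp h).1
      simp only [List.filter_cons, decide_true]
      rw [List.filter_eq_nil_iff.mpr (fun c hc => by
        have : c ≠ b := fun he => hnotin (he ▸ hc)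
        simp [this])]
      simp
    · have ha' : a ∈ l := by
        rcases List.mem_cons.mp ha with h' | h'
        · exact absurd h'.symm hb
        · exact h'
      simp only [List.filter_cons]
      rw [if_neg (by simp [hb])]
      exact ih (List.nodup_cons.mp h).2 ha'

-- ===== VERDICT helper: the main computation =====
theorem generate_tags_analysis_py_spec : Claim_equal_generate_tags_analysis_py := by
  intro xs _
  unfold Spec_generate_tags_analysis_py
  by_cases hne : xs = []
  · subst hne; rfl
  · unfold generate_tags_analysis_py generate_tags_analysis_py_alt
    rw [if_neg hne, if_neg hne]
    have hgetD : ∀ c : Int,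
        (xs.foldl (fun d p => PySem.Dict.modify d p.2 [] (fun l => l ++ [p.1])) PySem.Dict.empty).getD c []
          = (xs.filter (fun p => p.2 == c)).map (fun p => p.1) := by
      intro c
      have h1 : xs.foldl (fun d p => PySem.Dict.modify d p.2 [] (fun l => l ++ [p.1])) PySem.Dict.empty
          = (xs.map Prod.swap).foldl (fun d q => PySem.Dict.modify d q.1 [] (fun l => l ++ [q.2])) PySem.Dict.empty := by
        rw [List.foldl_map]
        rfl
      rw [h1, PySem.Dict.getD_foldl_modify_append]
      simp [List.filter_map, Function.comp_def, Prod.swap]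
    have hkeys := PySem.Dict.keys_foldl_modify_key xs (fun p : String × Int => p.2)
        ([] : List String) (fun _ p => (fun l => l ++ [p.1])) PySem.Dict.empty
    beta_reduce at hkeys
    have hkmem : ∀ c : Int,
        c ∈ (xs.foldl (fun d p => PySem.Dict.modify d p.2 [] (fun l => l ++ [p.1])) PySem.Dict.empty).keys
          ↔ c ∈ xs.map (fun p => p.2) := by
      intro c
      rw [hkeys]
      simp [PySem.Dict.keys_empty, PySem.Set.mem_update]
    have hknodup : (xs.foldl (fun d p => PySem.Dict.modify d p.2 [] (fun l => l ++ [p.1])) PySem.Dict.empty).keys.Nodup := by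
      have := PySem.Dict.nodup_keys_foldl_modify_key xs (fun p : String × Int => p.2)
        ([] : List String) (fun _ p => (fun l => l ++ [p.1])) PySem.Dict.empty PySem.Dict.nodup_keys_empty
      beta_reduce at this
      exact this
    set d := List.foldl (fun (d : PySem.Dict Int (List String)) p => d.modify p.2 [] fun l => l ++ [p.1]) PySem.Dict.empty xs with hd
    set ec := PySem.List.sorted d.keys (fun c => c) true with hecdef
    have hecmem : ∀ c : Int, c ∈ ec ↔ c ∈ xs.map (fun p => p.2) := by
      intro c
      rw [hecdef, PySem.List.mem_sorted]
      exact hkmem c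
    have hecnodup : ec.Nodup :=
      ((PySem.List.sorted_perm d.keys (fun c => c) true).nodup_iff).mpr hknodup
    have hecpw : ec.Pairwise (fun a b => b < a) := by
      have h1 := PySem.List.sorted_pairwise_rev d.keys (fun c => c)
      have h2 : ec.Pairwise (fun a b : Int => a ≠ b) := hecnodup
      exact (h1.and h2).imp (fun h => lt_of_le_of_ne h.1 (Ne.symm h.2))
    have hall : ∀ p ∈ xs, p.2 ∈ ec := fun p hp => (hecmem p.2).mpr (List.mem_map.mpr ⟨p, hp, rfl⟩)
    have hb : PySem.List.sorted xs (fun tc => -tc.2) false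
        = ec.flatMap (fun c => xs.filter (fun p => p.2 == c)) :=
      pv_sorted_decomp xs ec hecpw hall
    have hFne : ∀ c ∈ ec, xs.filter (fun p => p.2 == c) ≠ [] := by
      intro c hc
      rcases List.mem_map.mp ((hecmem c).mp hc) with ⟨p, hp, hpc⟩
      exact List.ne_nil_of_mem (List.mem_filter.mpr ⟨hp, by simp [hpc]⟩)
    obtain ⟨m, ec', hm⟩ : ∃ m ec', ec = m :: ec' := by
      cases hx : ec with
      | nil =>
        exfalso
        rcases List.exists_mem_of_ne_nil xs hne with ⟨p, hp⟩
        have := hall p hp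
        rw [hx] at this
        cases this
      | cons a l => exact ⟨a, l, rfl⟩
    rw [hb, hm]
    dsimp only
    have hG : ∀ c : Int, ∀ p ∈ xs.filter (fun p => p.2 == c), p.2 = c := by
      intro c p hp
      simpa using (List.mem_filter.mp hp).2
    obtain ⟨p0, rest0, hF0⟩ : ∃ p0 rest0, xs.filter (fun p => p.2 == m) = p0 :: rest0 := by
      cases hFm : xs.filter (fun p => p.2 == m) with
      | nil => exact absurd hFm (hFne m (by rw [hm]; exact List.mem_cons_self))
      | cons a l => exact ⟨a, l, rfl⟩
    have hp02 : p0.2 = m := hG m p0 (by rw [hF0]; exact List.mem_cons_self)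
    have hmax : (PySem.List.pyGetD
        (List.flatMap (fun c => List.filter (fun p => p.2 == c) xs) (m :: ec')) 0 ("", 0)).2 = m := by
      rw [List.flatMap_cons, hF0]
      simpa [PySem.List.pyGetD_ofNat'] using hp02
    rw [hmax]
    rw [← hecdef, hm]
    dsimp only
    have hhard : List.filter (fun tc => decide (tc.2 = m))
        (List.flatMap (fun c => List.filter (fun p => p.2 == c) xs) (m :: ec'))
        = List.filter (fun p => p.2 == m) xs := by
      have h := pv_filter_flatMap_classes (m :: ec') (fun c => List.filter (fun p => p.2 == c) xs)
        (fun c => decide (c = m)) hG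
      rw [pv_filter_eq_singleton (m :: ec') m (hm ▸ hecnodup) List.mem_cons_self] at h
      simpa using h
    have hmid := pv_filter_flatMap_classes (m :: ec') (fun c => List.filter (fun p => p.2 == c) xs)
      (fun c => decide (c ≠ m ∧ 1 < c)) hG
    have hone := pv_filter_flatMap_classes (m :: ec') (fun c => List.filter (fun p => p.2 == c) xs)
      (fun c => decide (c = 1)) hG
    rw [hhard, hmid, hone]
    rw [PySem.List.foldl_append_eq_flatMap]
    simp only [hgetD, List.map_flatMap, List.nil_append]
    have hmid_cases : List.filter (fun c => decide (c ≠ m ∧ 1 < c)) (m :: ec') = [] ∨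
        List.flatMap (fun c => List.map (fun p => p.1) (List.filter (fun p => p.2 == c) xs))
          (List.filter (fun c => decide (c ≠ m ∧ 1 < c)) (m :: ec')) ≠ [] := by
      cases hx : List.filter (fun c => decide (c ≠ m ∧ 1 < c)) (m :: ec') with
      | nil => exact Or.inl rfl
      | cons c0 mc' =>
        refine Or.inr ?_
        intro hcon
        have hc0ec : c0 ∈ ec := by
          rw [hm]
          exact List.mem_of_mem_filter (hx ▸ List.mem_cons_self)
        have := List.flatMap_eq_nil_iff.mp hcon c0 List.mem_cons_self
        exact hFne c0 hc0ec (List.map_eq_nil_iff.mp this)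
    have e_mid : (List.flatMap (fun c => List.map (fun p => p.1) (List.filter (fun p => p.2 == c) xs))
          (List.filter (fun c => decide (c ≠ m ∧ 1 < c)) (m :: ec')) ≠ [])
        ↔ List.filter (fun c => decide (c ≠ m ∧ 1 < c)) (m :: ec') ≠ [] := by
      rcases hmid_cases with h0 | hne'
      · rw [h0]
        simp
      · refine ⟨fun _ h0 => ?_, fun _ => hne'⟩
        rw [h0] at hne'
        exact hne' (by simp)
    simp only [e_mid]
    by_cases h1 : (1 : Int) ∈ ec
    · have hc1 : d.contains 1 = true :=
        (PySem.Dict.contains_iff_mem_keys d 1).mpr ((hkmem 1).mpr ((hecmem 1).mp h1))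
      have hs1 : List.filter (fun c => decide (c = 1)) (m :: ec') = [1] :=
        pv_filter_eq_singleton _ 1 (hm ▸ hecnodup) (hm ▸ h1)
      rw [hs1, hc1]
      simp [hFne 1 h1]
    · have hc1 : d.contains 1 = false := by
        rw [Bool.eq_false_iff]
        intro h
        exact h1 ((hecmem 1).mpr ((hkmem 1).mp ((PySem.Dict.contains_iff_mem_keys d 1).mp h)))
      have hs1 : List.filter (fun c => decide (c = 1)) (m :: ec') = [] := by
        rw [List.filter_eq_nil_iff]
        intro c hc hdec
        have : c = 1 := by simpa using hdec
        exact h1 (by rw [hm]; exact this ▸ hc)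
      rw [hs1, hc1]
      simp
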